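-- pv_equiv track=rewrite | github.com/arnabs542/oj | leetcode/permutations.py | _permuteKofNDP
-- ===== SOURCE A (Python) =====
-- def _permuteKofNDP(k, n):
--     """
--     :type m: int
--     :type n: int
--     :rtype: List[List[int]]
--     """
--     if k < 1 or n < 1 or k > n:
--         return []
--     # initialization
--     perms = [[[[]] if not j else []
--               for j in range(k + 1)]
--              for i in range(n + 1)]
--     # bottom of the dynamic programming process
--     # for i in range(n + 1):
--         # perms[i][0].append([])
--     for j in range(1, k + 1):
--         for i in range(j, n + 1):
--             # f[n - 1, k]
--             perms[i][j].extend(perms[i -1][j])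
--
--             # f[n - 1, k - 1] * k
--             for arrangement in perms[i - 1][j - 1]:
--                 for idx in range(len(arrangement) + 1):
--                     arrangement_new = list(arrangement)
--                     arrangement_new.insert(idx, i)
--                     perms[i][j].append(arrangement_new)
--
--     return sorted(perms[n][k])
-- ===== SOURCE B (Python) =====
-- def _permuteKofNDP(k, n):
--     """
--     :type m: int
--     :type n: int
--     :rtype: List[List[int]]
--     """
--     if k < 1 or n < 1 or k > n:
--         return []
--
--     result = []
--     perm = []
--     used = [False] * (n + 1)
--
--     def backtrack(j):
--         # scanning candidates in increasing order emits the permutations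
--         # already in lexicographic order, so no final sort is needed
--         if j == 0:
--             result.append(perm[:])
--             return
--         for v in range(1, n + 1):
--             if not used[v]:
--                 used[v] = True
--                 perm.append(v)
--                 backtrack(j - 1)
--                 perm.pop()
--                 used[v] = False
--
--     backtrack(k)
--     return result
-- ===== Notes on version B (the rewrite author's own statement) =====
-- stated objective: alternative
-- what changed: Replaces the DP table holding every j-permutation of 1..i for all i<=n, j<=k plus a final sort by direct backtracking with a used-array that emits the k-permutations already in lexicographic order.
import Mathlib
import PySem

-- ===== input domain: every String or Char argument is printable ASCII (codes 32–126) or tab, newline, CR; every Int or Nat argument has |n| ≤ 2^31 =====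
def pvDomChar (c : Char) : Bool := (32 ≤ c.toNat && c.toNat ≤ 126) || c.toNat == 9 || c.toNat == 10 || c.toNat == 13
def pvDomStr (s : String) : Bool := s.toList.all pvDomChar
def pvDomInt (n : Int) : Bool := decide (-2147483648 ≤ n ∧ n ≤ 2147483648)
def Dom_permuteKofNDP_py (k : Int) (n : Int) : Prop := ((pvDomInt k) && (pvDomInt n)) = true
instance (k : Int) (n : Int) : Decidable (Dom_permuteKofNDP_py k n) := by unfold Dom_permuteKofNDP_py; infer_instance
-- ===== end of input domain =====

-- B replaces A's DP table (which collects every j-permutation of 1..i for all i ≤ n, j ≤ k and sorts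
-- perms[n][k] at the end) by backtracking over a used-array that emits the k-permutations already in
-- lexicographic order, so no table and no final sort are needed.

-- ===== PORT A =====
def permuteKofNDP_py (k : Int) (n : Int) : List (List Int) :=
  if k < 1 ∨ n < 1 ∨ k > n then []
  else
    let perms0 : List (List (List (List Int))) :=
      (PySem.List.pyRange 0 (n + 1) 1).map (fun _i =>
        (PySem.List.pyRange 0 (k + 1) 1).map (fun j => if j = 0 then [[]] else []))
    let perms := (PySem.List.pyRange 1 (k + 1) 1).foldl (fun perms j =>
      (PySem.List.pyRange j (n + 1) 1).foldl (fun perms i =>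
        let cur := PySem.List.pyGetD (PySem.List.pyGetD perms i []) j []
        let cur := cur ++ PySem.List.pyGetD (PySem.List.pyGetD perms (i - 1) []) j []
        let cur := (PySem.List.pyGetD (PySem.List.pyGetD perms (i - 1) []) (j - 1) []).foldl
          (fun cur arrangement =>
            (PySem.List.pyRange 0 ((arrangement.length : Int) + 1) 1).foldl
              (fun cur idx => cur ++ [PySem.List.insert arrangement idx i]) cur) cur
        PySem.List.pySetD perms i (PySem.List.pySetD (PySem.List.pyGetD perms i []) j cur))
        perms) perms0
    PySem.List.sorted (PySem.List.pyGetD (PySem.List.pyGetD perms n []) k []) (fun x => x)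


-- ===== PORT B =====
-- helper for the recursive backtrack(j) closure of Source B (res/perm/used mutation rendered as
-- passing the updated used-table down and collecting each branch's output in order)
def permuteBT (n : Int) (used : List Bool) : Nat → List (List Int)
  | 0 => [[]]
  | j + 1 =>
    (PySem.List.pyRange 1 (n + 1) 1).flatMap (fun v =>
      if PySem.List.pyGetD used v false then []
      else (permuteBT n (PySem.List.pySetD used v true) j).map (fun rest => v :: rest))

def permuteKofNDP_py_alt (k : Int) (n : Int) : List (List Int) :=
  if k < 1 ∨ n < 1 ∨ k > n then []
  else permuteBT n (List.replicate (n + 1).toNat false) k.toNat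

-- ===== PRECONDITION & SPEC =====
def Spec_permuteKofNDP_py (k : Int) (n : Int) (out : List (List Int)) : Prop := out = permuteKofNDP_py_alt k n
instance (k : Int) (n : Int) (out : List (List Int)) : Decidable (Spec_permuteKofNDP_py k n out) := by unfold Spec_permuteKofNDP_py; infer_instance

-- ===== CLAIM (what is proved, stated in full; the proofs are below) =====
def Claim_equal_permuteKofNDP_py : Prop := ∀ (k : Int) (n : Int), Dom_permuteKofNDP_py k n → Spec_permuteKofNDP_py k n (permuteKofNDP_py k n)

-- ===== LEMMAS AND PROOFS =====

-- the value of A's DP cell perms[i][j] after the loops: all j-permutations of 1..i, in A's build order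
def dpP : Nat → Nat → List (List Int)
  | _, 0 => [[]]
  | 0, _ + 1 => []
  | i + 1, j + 1 =>
    dpP i (j + 1) ++ (dpP i j).flatMap (fun a =>
      (List.range (a.length + 1)).map (fun idx => a.insertIdx idx ((i : Int) + 1)))

theorem dpP_nil (i : Nat) : ∀ j, i < j → dpP i j = [] := by
  induction i with
  | zero => intro j h; cases j with | zero => omega | succ j => rfl
  | succ i ih =>
    intro j h
    cases j with
    | zero => omega
    | succ j =>
      simp only [dpP, ih (j+1) (by omega), ih j (by omega), List.flatMap_nil, List.append_nil]

theorem insertIdx_decomp (x : Int) : ∀ (l : List Int), l.Nodup → x ∈ l →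
    ∃ (a : List Int) (idx : Nat), idx ≤ a.length ∧ l = a.insertIdx idx x ∧ a.length + 1 = l.length ∧
      a.Nodup ∧ x ∉ a ∧ ∀ z ∈ a, z ∈ l := by
  intro l
  induction l with
  | nil => simp
  | cons y t ih =>
    intro hnd hx
    by_cases hy : y = x
    · subst hy
      refine ⟨t, 0, by omega, by simp, by simp, (List.nodup_cons.mp hnd).2, (List.nodup_cons.mp hnd).1, fun z hz => List.mem_cons_of_mem y hz⟩
    · have hxt : x ∈ t := by
        rcases List.mem_cons.mp hx with h | h
        · exact absurd h.symm hy
        · exact h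
      obtain ⟨a, idx, h1, h2, h3, h4, h5, h6⟩ := ih (List.nodup_cons.mp hnd).2 hxt
      refine ⟨y :: a, idx + 1, by simpa using h1, by simp [List.insertIdx_succ_cons, ← h2], by simp [← h3], ?_, ?_, ?_⟩
      · refine List.nodup_cons.mpr ⟨fun hc => (List.nodup_cons.mp hnd).1 (h6 y hc), h4⟩
      · intro hc
        rcases List.mem_cons.mp hc with h | h
        · exact hy h.symm
        · exact h5 h
      · intro z hz
        rcases List.mem_cons.mp hz with h | h
        · simp [h]
        · exact List.mem_cons_of_mem y (h6 z h)

theorem insertIdx_inj (x : Int) : ∀ (idx idx' : Nat) (a b : List Int), x ∉ a → x ∉ b →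
    idx ≤ a.length → idx' ≤ b.length →
    a.insertIdx idx x = b.insertIdx idx' x → a = b ∧ idx = idx' := by
  intro idx
  induction idx with
  | zero =>
    intro idx' a b hxa hxb _ h' heq
    cases idx' with
    | zero => simpa using heq
    | succ m =>
      cases b with
      | nil => simp at h'
      | cons d bt =>
        rw [List.insertIdx_zero, List.insertIdx_succ_cons] at heq
        have : x = d := by exact (List.cons_eq_cons.mp heq).1
        exact absurd (this ▸ List.mem_cons_self) hxb
  | succ m ih =>
    intro idx' a b hxa hxb h h' heq
    cases a with
    | nil => simp at h
    | cons c at' =>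
      cases idx' with
      | zero =>
        rw [List.insertIdx_zero, List.insertIdx_succ_cons] at heq
        have : c = x := (List.cons_eq_cons.mp heq).1
        exact absurd (this ▸ List.mem_cons_self) hxa
      | succ m' =>
        cases b with
        | nil => simp at h'
        | cons d bt =>
          rw [List.insertIdx_succ_cons, List.insertIdx_succ_cons] at heq
          obtain ⟨h1, h2⟩ := List.cons_eq_cons.mp heq
          obtain ⟨h3, h4⟩ := ih m' at' bt (fun hc => hxa (List.mem_cons_of_mem c hc))
            (fun hc => hxb (List.mem_cons_of_mem d hc)) (by simpa using h) (by simpa using h') h2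
          exact ⟨by rw [h1, h3], by rw [h4]⟩

theorem mem_dpP : ∀ (i j : Nat) (l : List Int),
    l ∈ dpP i j ↔ l.length = j ∧ l.Nodup ∧ ∀ x ∈ l, 1 ≤ x ∧ x ≤ (i : Int) := by
  intro i
  induction i with
  | zero =>
    intro j l
    cases j with
    | zero =>
      simp only [dpP, List.mem_singleton]
      constructor
      · rintro rfl; simp
      · rintro ⟨h1, _, _⟩; exact List.length_eq_zero_iff.mp h1
    | succ j =>
      simp only [dpP, List.not_mem_nil, false_iff]
      rintro ⟨h1, _, h3⟩
      cases l with
      | nil => simp at h1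
      | cons y t => have := h3 y (by simp); omega
  | succ i ih =>
    intro j l
    cases j with
    | zero =>
      simp only [dpP, List.mem_singleton]
      constructor
      · rintro rfl; simp
      · rintro ⟨h1, _, _⟩; exact List.length_eq_zero_iff.mp h1
    | succ j =>
      simp only [dpP, List.mem_append, List.mem_flatMap, List.mem_map, List.mem_range]
      constructor
      · rintro (h | ⟨a, ha, idx, hidx, rfl⟩)
        · obtain ⟨h1, h2, h3⟩ := (ih (j+1) l).mp h
          exact ⟨h1, h2, fun x hx => ⟨(h3 x hx).1, by have := (h3 x hx).2; push_cast; omega⟩⟩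
        · obtain ⟨h1, h2, h3⟩ := (ih j a).mp ha
          have hidx' : idx ≤ a.length := by omega
          have hxa : ((i : Int) + 1) ∉ a := fun hc => by have := (h3 _ hc).2; omega
          refine ⟨by rw [List.length_insertIdx, if_pos hidx', h1], ?_, ?_⟩
          · rw [(List.perm_insertIdx _ _ hidx').nodup_iff]
            simp [h2, hxa]
          · intro x hx
            rcases (List.mem_insertIdx hidx').mp hx with rfl | hm
            · constructor <;> push_cast <;> omega
            · obtain ⟨u, v⟩ := h3 x hm
              exact ⟨u, by push_cast; omega⟩
      · rintro ⟨h1, h2, h3⟩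
        by_cases hm : ((i : Int) + 1) ∈ l
        · right
          obtain ⟨a, idx, hle, heq, hlen, hnd, hout, hsub⟩ := insertIdx_decomp _ l h2 hm
          refine ⟨a, (ih j a).mpr ⟨by omega, hnd, ?_⟩, idx, by omega, heq.symm⟩
          intro z hz
          obtain ⟨u, v⟩ := h3 z (hsub z hz)
          have : z ≠ (i:Int) + 1 := fun hc => hout (hc ▸ hz)
          constructor
          · exact u
          · push_cast at v ⊢; omega
        · left
          refine (ih (j+1) l).mpr ⟨h1, h2, fun x hx => ?_⟩
          obtain ⟨u, v⟩ := h3 x hx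
          have : x ≠ (i:Int) + 1 := fun hc => hm (hc ▸ hx)
          refine ⟨u, ?_⟩
          push_cast at v ⊢; omega

theorem nodup_dpP : ∀ (i j : Nat), (dpP i j).Nodup := by
  intro i
  induction i with
  | zero =>
    intro j; cases j with
    | zero => simp [dpP]
    | succ j => simp [dpP]
  | succ i ih =>
    intro j
    cases j with
    | zero => simp [dpP]
    | succ j =>
      simp only [dpP]
      rw [List.nodup_append]
      refine ⟨ih (j+1), ?_, ?_⟩
      · rw [List.nodup_flatMap]
        constructor
        · intro a ha
          obtain ⟨h1, h2, h3⟩ := (mem_dpP i j a).mp ha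
          have hxa : ((i : Int) + 1) ∉ a := fun hc => by have := (h3 _ hc).2; omega
          refine List.Nodup.map_on ?_ List.nodup_range
          intro i1 hi1 i2 hi2 he
          exact (insertIdx_inj _ i1 i2 a a hxa hxa (by simp at hi1; omega) (by simp at hi2; omega) he).2
        · have hnd : (dpP i j).Nodup := ih j
          refine hnd.imp_of_mem ?_
          intro a b ha hb hne l hla hlb
          obtain ⟨ha1, ha2, ha3⟩ := (mem_dpP i j a).mp ha
          obtain ⟨hb1, hb2, hb3⟩ := (mem_dpP i j b).mp hb
          have hxa : ((i : Int) + 1) ∉ a := fun hc => by have := (ha3 _ hc).2; omega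
          have hxb : ((i : Int) + 1) ∉ b := fun hc => by have := (hb3 _ hc).2; omega
          obtain ⟨i1, hi1, rfl⟩ := List.mem_map.mp hla
          obtain ⟨i2, hi2, he⟩ := List.mem_map.mp hlb
          simp only [List.mem_range] at hi1 hi2
          exact hne ((insertIdx_inj _ i1 i2 a b hxa hxb (by omega) (by omega) he.symm).1)
      · intro l hl l2 hl2
        rw [List.mem_flatMap] at hl2
        obtain ⟨a, ha, hl2⟩ := hl2
        rw [List.mem_map] at hl2
        obtain ⟨i1, hi1, rfl⟩ := hl2
        rw [List.mem_range] at hi1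
        obtain ⟨_, _, h3⟩ := (mem_dpP i (j+1) _).mp hl
        intro heq
        have hmem : ((i : Int) + 1) ∈ a.insertIdx i1 ((i : Int) + 1) :=
          (List.mem_insertIdx (by omega)).mpr (Or.inl rfl)
        have := (h3 _ (heq ▸ hmem)).2
        omega

theorem pyGetD_replicate (m : Nat) (x : Int) (h0 : 0 ≤ x) (h : x < (m : Int)) :
    PySem.List.pyGetD (List.replicate m false) x false = false := by
  rw [PySem.List.pyGetD_eq_getElem _ _ h0 (by simpa using h)]
  simp

theorem pyGetD_pySetD' (used : List Bool) (b : Bool) (v x : Int) (hv0 : 0 ≤ v) (hv : v < (used.length : Int))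
    (hx0 : 0 ≤ x) (hx : x < (used.length : Int)) :
    PySem.List.pyGetD (PySem.List.pySetD used v b) x false
      = if x = v then b else PySem.List.pyGetD used x false := by
  have hvn : v = ((v.toNat : Nat) : Int) := by omega
  have hxn : x = ((x.toNat : Nat) : Int) := by omega
  rw [hvn, hxn, PySem.List.pyGetD_pySetD_natCast _ _ _ _ _ (by omega)]
  split_ifs with h1 h2
  · rfl
  · omega
  · omega
  · rfl

theorem length_pySetD' (used : List Bool) (b : Bool) (v : Int) :
    (PySem.List.pySetD used v b).length = used.length := by
  simp [PySem.List.length_pySetD]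

theorem mem_bt (n : Int) : ∀ (j : Nat) (used : List Bool), (used.length : Int) = n + 1 →
    ∀ (l : List Int), l ∈ permuteBT n used j ↔
      l.length = j ∧ l.Nodup ∧
        ∀ x ∈ l, 1 ≤ x ∧ x < n + 1 ∧ PySem.List.pyGetD used x false = false := by
  intro j
  induction j with
  | zero =>
    intro used _ l
    simp only [permuteBT, List.mem_singleton]
    constructor
    · rintro rfl; simp
    · rintro ⟨h1, _, _⟩; exact List.length_eq_zero_iff.mp h1
  | succ j ih =>
    intro used hlen l
    simp only [permuteBT, List.mem_flatMap]
    constructor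
    · rintro ⟨v, hv, hbr⟩
      rw [PySem.List.mem_pyRange_one] at hv
      by_cases hg : PySem.List.pyGetD used v false
      · rw [if_pos hg] at hbr; simp at hbr
      · rw [if_neg hg, List.mem_map] at hbr
        obtain ⟨rest, hrest, rfl⟩ := hbr
        simp only [Bool.not_eq_true] at hg
        obtain ⟨r1, r2, r3⟩ := (ih _ (by rw [(length_pySetD' used true v : _)]; exact hlen) rest).mp hrest
        have hvnotin : v ∉ rest := by
          intro hc
          have := (r3 v hc).2.2
          rw [pyGetD_pySetD' used true v v (by omega) (by omega) (by omega) (by omega)] at this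
          simp at this
        refine ⟨by simp [r1], List.nodup_cons.mpr ⟨hvnotin, r2⟩, ?_⟩
        intro x hx
        rcases List.mem_cons.mp hx with rfl | hx'
        · exact ⟨hv.1, hv.2, hg⟩
        · obtain ⟨u1, u2, u3⟩ := r3 x hx'
          rw [pyGetD_pySetD' used true v x (by omega) (by omega) (by omega) (by omega)] at u3
          by_cases hxv : x = v
          · rw [if_pos hxv] at u3; simp at u3
          · rw [if_neg hxv] at u3; exact ⟨u1, u2, u3⟩
    · rintro ⟨h1, h2, h3⟩
      cases l with
      | nil => simp at h1
      | cons v rest =>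
        obtain ⟨u1, u2, u3⟩ := h3 v List.mem_cons_self
        refine ⟨v, PySem.List.mem_pyRange_one.mpr ⟨u1, u2⟩, ?_⟩
        rw [if_neg (by simp [u3]), List.mem_map]
        refine ⟨rest, ?_, rfl⟩
        refine (ih _ (by rw [(length_pySetD' used true v : _)]; exact hlen) rest).mpr ⟨by simpa using h1, (List.nodup_cons.mp h2).2, ?_⟩
        intro x hx
        obtain ⟨w1, w2, w3⟩ := h3 x (List.mem_cons_of_mem v hx)
        have hxv : x ≠ v := fun hc => (List.nodup_cons.mp h2).1 (hc ▸ hx)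
        rw [pyGetD_pySetD' used true v x (by omega) (by omega) (by omega) (by omega), if_neg hxv]
        exact ⟨w1, w2, w3⟩

theorem bt_branch_shape (n : Int) (j : Nat) (used : List Bool) (v : Int) (l : List Int)
    (h : l ∈ (if PySem.List.pyGetD used v false then ([] : List (List Int))
        else (permuteBT n (PySem.List.pySetD used v true) j).map (fun rest => v :: rest))) :
    ∃ r, l = v :: r ∧ r ∈ permuteBT n (PySem.List.pySetD used v true) j := by
  by_cases hg : PySem.List.pyGetD used v false
  · rw [if_pos hg] at h; simp at h
  · rw [if_neg hg, List.mem_map] at h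
    obtain ⟨r, hr, rfl⟩ := h
    exact ⟨r, rfl, hr⟩

theorem nodup_bt (n : Int) : ∀ (j : Nat) (used : List Bool), (permuteBT n used j).Nodup := by
  intro j
  induction j with
  | zero => intro used; simp [permuteBT]
  | succ j ih =>
    intro used
    simp only [permuteBT]
    rw [List.nodup_flatMap]
    constructor
    · intro v _
      by_cases hg : PySem.List.pyGetD used v false
      · rw [if_pos hg]; simp
      · rw [if_neg hg]
        exact (ih _).map (fun r1 r2 h => by simpa using h)
    · refine (PySem.List.pairwise_lt_pyRange_one 1 (n+1)).imp_of_mem ?_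
      intro v v' _ _ hlt l hl hl'
      obtain ⟨r, rfl, _⟩ := bt_branch_shape n j used v l hl
      obtain ⟨r', he, _⟩ := bt_branch_shape n j used v' _ hl'
      have := (List.cons_eq_cons.mp he).1
      omega

theorem pairwise_lt_bt (n : Int) : ∀ (j : Nat) (used : List Bool),
    (permuteBT n used j).Pairwise (· < ·) := by
  intro j
  induction j with
  | zero => intro used; simp [permuteBT]
  | succ j ih =>
    intro used
    simp only [permuteBT]
    rw [List.pairwise_flatMap]
    constructor
    · intro v _
      by_cases hg : PySem.List.pyGetD used v false
      · rw [if_pos hg]; simp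
      · rw [if_neg hg]
        rw [List.pairwise_map]
        exact (ih _).imp (fun h => List.cons_lt_cons_iff.mpr (Or.inr ⟨rfl, h⟩))
    · refine (PySem.List.pairwise_lt_pyRange_one 1 (n+1)).imp_of_mem ?_
      intro v v' _ _ hlt l hl l' hl'
      obtain ⟨r, rfl, _⟩ := bt_branch_shape n j used v l hl
      obtain ⟨r', rfl, _⟩ := bt_branch_shape n j used v' l' hl'
      exact List.cons_lt_cons_iff.mpr (Or.inl hlt)

theorem insertIdx_eq_take_drop (l : List Int) (i : Nat) (x : Int) (h : i ≤ l.length) :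
    l.insertIdx i x = l.take i ++ x :: l.drop i := by
  induction l generalizing i with
  | nil => simp at h; subst h; simp
  | cons c t ih =>
    cases i with
    | zero => simp
    | succ m =>
      simp only [List.insertIdx_succ_cons, List.take_succ_cons, List.drop_succ_cons,
        List.cons_append, List.cons.injEq, true_and]
      exact ih m (by simpa using h)

-- table infrastructure for A's DP
def tableOf (nn kk : Nat) (f : Nat → Nat → List (List Int)) : List (List (List (List Int))) :=
  (List.range (nn + 1)).map (fun i => (List.range (kk + 1)).map (fun j => f i j))

theorem getD2 (nn kk : Nat) (f : Nat → Nat → List (List Int)) (i j : Int)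
    (hi0 : 0 ≤ i) (hi : i ≤ (nn : Int)) (hj0 : 0 ≤ j) (hj : j ≤ (kk : Int)) :
    PySem.List.pyGetD (PySem.List.pyGetD (tableOf nn kk f) i []) j [] = f i.toNat j.toNat := by
  have h1 : i < ((tableOf nn kk f).length : Int) := by simp [tableOf]; omega
  rw [PySem.List.pyGetD_eq_getElem _ _ hi0 h1]
  have h2 : i.toNat < (List.range (nn+1)).length := by simp; omega
  simp only [tableOf, List.getElem_map, List.getElem_range]
  have h3 : j < (((List.range (kk + 1)).map (fun j => f i.toNat j)).length : Int) := by simp; omega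
  rw [PySem.List.pyGetD_eq_getElem _ _ hj0 h3]
  simp

theorem set_map_range {α : Type} (g : Nat → α) (m q : Nat) (hq : q < m) (c : α) :
    ((List.range m).map g).set q c = (List.range m).map (fun t => if t = q then c else g t) := by
  apply List.ext_getElem
  · simp
  · intro p hp hp'
    simp only [List.length_set, List.length_map, List.length_range] at hp hp'
    rw [List.getElem_set]
    simp only [List.getElem_map, List.getElem_range]
    by_cases h : q = p
    · rw [if_pos h, if_pos h.symm]
    · rw [if_neg h, if_neg (fun hc => h hc.symm)]

theorem setD2 (nn kk : Nat) (f : Nat → Nat → List (List Int)) (i j : Int) (c : List (List Int))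
    (hi0 : 0 ≤ i) (hi : i ≤ (nn : Int)) (hj0 : 0 ≤ j) (hj : j ≤ (kk : Int)) :
    PySem.List.pySetD (tableOf nn kk f) i
        (PySem.List.pySetD (PySem.List.pyGetD (tableOf nn kk f) i []) j c)
      = tableOf nn kk (fun i' j' => if i' = i.toNat ∧ j' = j.toNat then c else f i' j') := by
  have hin : i = ((i.toNat : Nat) : Int) := by omega
  have hjn : j = ((j.toNat : Nat) : Int) := by omega
  rw [hin, hjn, PySem.List.pySetD_natCast, PySem.List.pySetD_natCast, PySem.List.pyGetD_natCast]
  simp only [Int.toNat_natCast]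
  have hrow : (tableOf nn kk f).getD i.toNat [] = (List.range (kk + 1)).map (fun j => f i.toNat j) := by
    rw [List.getD_eq_getElem?_getD]
    simp [tableOf, (by omega : i.toNat < nn + 1)]
  rw [hrow, set_map_range _ _ _ (by omega),
    show tableOf nn kk f = (List.range (nn+1)).map (fun t => (List.range (kk + 1)).map (fun j => f t j)) from rfl,
    set_map_range _ _ _ (by omega)]
  apply List.map_congr_left
  intro p hp
  by_cases hpi : p = i.toNat
  · rw [if_pos hpi]
    subst hpi
    apply List.map_congr_left
    intro q hq
    beta_reduce
    by_cases hqj : q = j.toNat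
    · rw [if_pos hqj, if_pos ⟨rfl, hqj⟩]
    · rw [if_neg hqj, if_neg (fun hc => hqj hc.2)]
  · rw [if_neg hpi]
    apply List.map_congr_left
    intro q hq
    beta_reduce
    rw [if_neg (fun hc => hpi hc.1)]

def tblM (nn kk j0 i0 : Nat) : List (List (List (List Int))) :=
  tableOf nn kk (fun i j => if j ≤ j0 ∨ (j = j0 + 1 ∧ i ≤ i0) then dpP i j else [])

def tbl (nn kk j0 : Nat) : List (List (List (List Int))) :=
  tableOf nn kk (fun i j => if j ≤ j0 then dpP i j else [])

def IB (j : Int) (perms : List (List (List (List Int)))) (i : Int) : List (List (List (List Int))) :=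
  let cur := PySem.List.pyGetD (PySem.List.pyGetD perms i []) j []
  let cur := cur ++ PySem.List.pyGetD (PySem.List.pyGetD perms (i - 1) []) j []
  let cur := (PySem.List.pyGetD (PySem.List.pyGetD perms (i - 1) []) (j - 1) []).foldl
    (fun cur arrangement =>
      (PySem.List.pyRange 0 ((arrangement.length : Int) + 1) 1).foldl
        (fun cur idx => cur ++ [PySem.List.insert arrangement idx i]) cur) cur
  PySem.List.pySetD perms i (PySem.List.pySetD (PySem.List.pyGetD perms i []) j cur)

def OB (n : Int) (perms : List (List (List (List Int)))) (j : Int) : List (List (List (List Int))) :=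
  (PySem.List.pyRange j (n + 1) 1).foldl (IB j) perms

theorem IB_step (nn kk j0 i0 : Nat) (h1 : j0 ≤ i0) (h2 : i0 < nn) (h3 : j0 < kk) :
    IB ((j0 : Int) + 1) (tblM nn kk j0 i0) ((i0 : Int) + 1) = tblM nn kk j0 (i0 + 1) := by
  simp only [IB, tblM]
  rw [show (i0 : Int) + 1 - 1 = ((i0 : Nat) : Int) by ring,
      show (j0 : Int) + 1 - 1 = ((j0 : Nat) : Int) by ring]
  rw [getD2 nn kk _ ((i0:Int)+1) ((j0:Int)+1) (by omega) (by omega) (by omega) (by omega),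
      getD2 nn kk _ ((i0:Int)) ((j0:Int)+1) (by omega) (by omega) (by omega) (by omega),
      getD2 nn kk _ ((i0:Int)) ((j0:Int)) (by omega) (by omega) (by omega) (by omega)]
  simp only [Int.toNat_natCast, show ((i0:Int)+1).toNat = i0 + 1 from by omega,
    show ((j0:Int)+1).toNat = j0 + 1 from by omega]
  rw [if_neg (show ¬ (j0 + 1 ≤ j0 ∨ (True ∧ i0 + 1 ≤ i0)) from by simp),
      if_pos (show j0 + 1 ≤ j0 ∨ (True ∧ i0 ≤ i0) from by simp),
      if_pos (show j0 ≤ j0 ∨ (j0 = j0 + 1 ∧ i0 ≤ i0) from by omega)]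
  -- collapse the two appending folds into a flatMap
  simp only [PySem.List.foldl_append_singleton_eq_map]
  rw [PySem.List.foldl_append_eq_flatMap
    (fun arrangement => (PySem.List.pyRange 0 ((arrangement.length : Int) + 1) 1).map
      (fun idx => PySem.List.insert arrangement idx ((i0 : Int) + 1)))]
  have hflat : (dpP i0 j0).flatMap
      (fun arrangement => (PySem.List.pyRange 0 ((arrangement.length : Int) + 1) 1).map
        (fun idx => PySem.List.insert arrangement idx ((i0 : Int) + 1)))
      = (dpP i0 j0).flatMap (fun a =>
        (List.range (a.length + 1)).map (fun idx => a.insertIdx idx ((i0 : Int) + 1))) := by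
    apply List.flatMap_congr
    intro a _
    rw [PySem.List.pyRange_one]
    rw [show ((a.length : Int) + 1 - 0).toNat = a.length + 1 from by omega, List.map_map]
    apply List.map_congr_left
    intro t ht
    rw [List.mem_range] at ht
    simp only [Function.comp_apply, zero_add]
    rw [PySem.List.insert_natCast _ _ _ (by omega), insertIdx_eq_take_drop _ _ _ (by omega)]
  rw [hflat]
  have hdp : dpP i0 (j0+1) ++ (dpP i0 j0).flatMap (fun a =>
      (List.range (a.length + 1)).map (fun idx => a.insertIdx idx ((i0 : Int) + 1)))
      = dpP (i0+1) (j0+1) := rfl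
  rw [List.nil_append, hdp]
  rw [setD2 nn kk _ _ _ _ (by omega) (by omega) (by omega) (by omega)]
  simp only [show ((i0:Int)+1).toNat = i0 + 1 from by omega,
    show ((j0:Int)+1).toNat = j0 + 1 from by omega]
  unfold tableOf
  apply List.map_congr_left
  intro p hp
  rw [List.mem_range] at hp
  apply List.map_congr_left
  intro q hq
  rw [List.mem_range] at hq
  beta_reduce
  by_cases hc : p = i0 + 1 ∧ q = j0 + 1
  · obtain ⟨rfl, rfl⟩ := hc
    rw [if_pos ⟨rfl, rfl⟩, if_pos (Or.inr ⟨rfl, le_refl _⟩)]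
  · rw [if_neg hc]
    by_cases hc2 : q ≤ j0 ∨ (q = j0 + 1 ∧ p ≤ i0)
    · rw [if_pos hc2, if_pos (show q ≤ j0 ∨ (q = j0 + 1 ∧ p ≤ i0 + 1) from by omega)]
    · rw [if_neg hc2, if_neg (show ¬ (q ≤ j0 ∨ (q = j0 + 1 ∧ p ≤ i0 + 1)) from by omega)]

theorem dpP_zero (i : Nat) : dpP i 0 = [[]] := by cases i <;> rfl

theorem tblM_start (nn kk j0 : Nat) : tblM nn kk j0 j0 = tbl nn kk j0 := by
  unfold tblM tbl tableOf
  apply List.map_congr_left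
  intro p hp
  apply List.map_congr_left
  intro q hq
  beta_reduce
  by_cases hc : q ≤ j0
  · rw [if_pos (Or.inl hc), if_pos hc]
  · rw [if_neg hc]
    by_cases hc2 : q = j0 + 1 ∧ p ≤ j0
    · rw [if_pos (Or.inr hc2), dpP_nil p q (by omega)]
    · rw [if_neg (by tauto)]

theorem tblM_end (nn kk j0 : Nat) : tblM nn kk j0 nn = tbl nn kk (j0 + 1) := by
  unfold tblM tbl tableOf
  apply List.map_congr_left
  intro p hp
  rw [List.mem_range] at hp
  apply List.map_congr_left
  intro q hq
  beta_reduce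
  by_cases hc : q ≤ j0 + 1
  · rw [if_pos hc]
    by_cases hc2 : q ≤ j0
    · rw [if_pos (Or.inl hc2)]
    · rw [if_pos (Or.inr ⟨by omega, by omega⟩)]
  · rw [if_neg hc, if_neg (by omega)]

theorem inner_fold (nn kk j0 : Nat) (h3 : j0 < kk) :
    ∀ i0, j0 ≤ i0 → i0 ≤ nn →
    (PySem.List.pyRange ((j0:Int)+1) ((i0:Int)+1) 1).foldl (IB ((j0:Int)+1)) (tblM nn kk j0 j0)
      = tblM nn kk j0 i0 := by
  intro i0 hge
  induction i0, hge using Nat.le_induction with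
  | base =>
    intro _
    rw [PySem.List.pyRange_one_eq_nil (by omega)]
    simp
  | succ i0 hle ih =>
    intro hub
    rw [show ((i0+1:Nat):Int) = (i0:Int)+1 from by push_cast; ring,
      PySem.List.pyRange_one_succ_right (by omega), List.foldl_append]
    rw [ih (by omega)]
    simp only [List.foldl_cons, List.foldl_nil]
    exact IB_step nn kk j0 i0 hle (by omega) h3

theorem outer_fold (nn kk : Nat) (hkn : kk ≤ nn) : ∀ j0, j0 ≤ kk →
    (PySem.List.pyRange 1 ((j0:Int)+1) 1).foldl (OB ((nn:Int))) (tbl nn kk 0) = tbl nn kk j0 := by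
  intro j0
  induction j0 with
  | zero =>
    intro _
    rw [show ((0:Nat):Int)+1 = 1 from by norm_num, PySem.List.pyRange_one_eq_nil (by omega)]
    simp
  | succ j0 ih =>
    intro hub
    rw [show ((j0+1:Nat):Int)+1 = ((j0:Int)+1)+1 from by push_cast; ring,
      PySem.List.pyRange_one_succ_right (by omega), List.foldl_append]
    rw [ih (by omega)]
    simp only [List.foldl_cons, List.foldl_nil]
    show OB ((nn:Int)) (tbl nn kk j0) ((j0:Int)+1) = tbl nn kk (j0+1)
    unfold OB
    rw [← tblM_start nn kk j0,
      show (nn:Int)+1 = ((nn:Nat):Int)+1 from rfl]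
    rw [inner_fold nn kk j0 (by omega) nn (by omega) (by omega)]
    exact tblM_end nn kk j0

theorem init_tbl (nn kk : Nat) :
    (PySem.List.pyRange 0 ((nn:Int)+1) 1).map (fun _i =>
      (PySem.List.pyRange 0 ((kk:Int)+1) 1).map (fun j => if j = 0 then [[]] else []))
      = tbl nn kk 0 := by
  unfold tbl tableOf
  rw [PySem.List.pyRange_one 0 ((nn:Int)+1), show ((nn:Int)+1-0).toNat = nn + 1 from by omega, List.map_map]
  apply List.map_congr_left
  intro p hp
  simp only [Function.comp_apply]
  rw [PySem.List.pyRange_one 0 ((kk:Int)+1), show ((kk:Int)+1-0).toNat = kk + 1 from by omega, List.map_map]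
  apply List.map_congr_left
  intro q hq
  simp only [Function.comp_apply, zero_add]
  by_cases hq0 : q = 0
  · subst hq0
    rw [if_pos (show ((0:Nat):Int) = 0 from by norm_num), if_pos (by omega), dpP_zero]
  · rw [if_neg (by exact_mod_cast hq0), if_neg (by omega)]

theorem sorted_inst_bridge (xs : List (List Int)) :
    @PySem.List.sorted (List Int) (List Int) List.instLT (fun a b => a.decidableLT b) xs (fun x => x) false
    = @PySem.List.sorted (List Int) (List Int) List.instLinearOrder.toLT
        (@LinearOrder.toDecidableLT _ List.instLinearOrder) xs (fun x => x) false := by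
  have h : (fun (a b : List Int) => a.decidableLT b) = (@LinearOrder.toDecidableLT _ List.instLinearOrder) := by
    funext a b; exact Subsingleton.elim _ _
  rw [h]

theorem main_spec (k n : Int) : permuteKofNDP_py k n = permuteKofNDP_py_alt k n := by
  unfold permuteKofNDP_py permuteKofNDP_py_alt
  by_cases hg : k < 1 ∨ n < 1 ∨ k > n
  · rw [if_pos hg, if_pos hg]
  · rw [if_neg hg, if_neg hg]
    push_neg at hg
    obtain ⟨hk1, hn1, hkn⟩ := hg
    have hk : ((k.toNat : Nat) : Int) = k := by omega
    have hn : ((n.toNat : Nat) : Int) = n := by omega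
    have hOB : (fun (perms : List (List (List (List Int)))) (j : Int) =>
        (PySem.List.pyRange j (n + 1) 1).foldl (fun perms i =>
          let cur := PySem.List.pyGetD (PySem.List.pyGetD perms i []) j []
          let cur := cur ++ PySem.List.pyGetD (PySem.List.pyGetD perms (i - 1) []) j []
          let cur := (PySem.List.pyGetD (PySem.List.pyGetD perms (i - 1) []) (j - 1) []).foldl
            (fun cur arrangement =>
              (PySem.List.pyRange 0 ((arrangement.length : Int) + 1) 1).foldl
                (fun cur idx => cur ++ [PySem.List.insert arrangement idx i]) cur) cur
          PySem.List.pySetD perms i (PySem.List.pySetD (PySem.List.pyGetD perms i []) j cur))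
          perms) = OB n := by
      funext perms j
      rfl
    rw [hOB]
    simp only []
    rw [← hk, ← hn, init_tbl n.toNat k.toNat,
      outer_fold n.toNat k.toNat (by omega) k.toNat (by omega)]
    rw [show tbl n.toNat k.toNat k.toNat
        = tableOf n.toNat k.toNat (fun i j => if j ≤ k.toNat then dpP i j else []) from rfl,
      getD2 n.toNat k.toNat _ ((n.toNat : Nat) : Int) ((k.toNat : Nat) : Int)
        (by omega) (by omega) (by omega) (by omega)]
    simp only [Int.toNat_natCast]
    rw [if_pos (le_refl k.toNat)]
    rw [sorted_inst_bridge]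
    have hlen : (((List.replicate (((n.toNat : Nat) : Int) + 1).toNat false).length : Nat) : Int) = ((n.toNat : Nat) : Int) + 1 := by
      simp; omega
    have hperm : (permuteBT ((n.toNat : Nat) : Int) (List.replicate (((n.toNat : Nat) : Int) + 1).toNat false) k.toNat).Perm
        (dpP n.toNat k.toNat) := by
      rw [List.perm_ext_iff_of_nodup (nodup_bt _ _ _) (nodup_dpP _ _)]
      intro l
      rw [mem_bt _ _ _ hlen, mem_dpP]
      constructor
      · rintro ⟨h1, h2, h3⟩
        refine ⟨h1, h2, fun x hx => ?_⟩
        obtain ⟨u1, u2, _⟩ := h3 x hx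
        exact ⟨u1, by omega⟩
      · rintro ⟨h1, h2, h3⟩
        refine ⟨h1, h2, fun x hx => ?_⟩
        obtain ⟨u1, u2⟩ := h3 x hx
        refine ⟨u1, by omega, pyGetD_replicate _ _ (by omega) (by omega)⟩
    have hpw : (permuteBT ((n.toNat : Nat) : Int) (List.replicate (((n.toNat : Nat) : Int) + 1).toNat false) k.toNat).Pairwise
        (fun a b => (fun x => x) a < (fun x => x) b) := by
      have := pairwise_lt_bt ((n.toNat : Nat) : Int) k.toNat (List.replicate (((n.toNat : Nat) : Int) + 1).toNat false)
      exact this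
    exact PySem.List.sorted_eq_of_perm_of_pairwise_lt _ _ _ hperm hpw

-- ===== VERDICT (by name: the statement is the Claim_ definition above) =====
theorem permuteKofNDP_py_spec : Claim_equal_permuteKofNDP_py := by
  intro k n _
  show permuteKofNDP_py k n = permuteKofNDP_py_alt k n
  exact main_spec k n
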